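-- pv_equiv track=rewrite | github.com/Michaelminas/idiag | app/services/firmware_manager.py | _parse_ipsw_filename
-- ===== SOURCE A (Python) =====
-- def _parse_ipsw_filename(filename: str) -> tuple[str, str, str]:
--     """Extract (model, version, build_id) from cache filename."""
--     stem = filename.rsplit(".", 1)[0]  # remove .ipsw
--     parts = stem.split("_")
--     # Find the version part (first segment containing a dot)
--     version_idx = None
--     for i, part in enumerate(parts):
--         if "." in part:
--             version_idx = i
--             break
--     if version_idx is None or version_idx < 1:
--         return "", "", ""
--     # Everything before version_idx is the model (rejoin, replace first _ with ,)
--     model_parts = parts[:version_idx]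
--     model = "_".join(model_parts)
--     # Restore first underscore to comma: iPhone14_2 -> iPhone14,2
--     model = model.replace("_", ",", 1)
--     version = parts[version_idx]
--     build_id = "_".join(parts[version_idx + 1:]) if version_idx + 1 < len(parts) else ""
--     return model, version, build_id
-- ===== SOURCE B (Python) =====
-- def _parse_ipsw_filename(filename: str) -> tuple[str, str, str]:
--     """Extract (model, version, build_id) from cache filename."""
--     stem = filename.rsplit(".", 1)[0]  # remove .ipsw
--     d = stem.find(".")
--     if d == -1:
--         return "", "", ""
--     # version segment starts after the last '_' before the first dot
--     model, us, _ = stem[:d].rpartition("_")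
--     if not us:
--         return "", "", ""
--     version, _, build = stem[len(model) + 1:].partition("_")
--     return model.replace("_", ",", 1), version, build
-- ===== Notes on version B (the rewrite author's own statement) =====
-- stated objective: alternative
-- what changed: B never builds the token list A creates by splitting the stem on underscores and rejoining with underscore joins: it locates the version segment by character index (find the first dot, rpartition the prefix at its last underscore, partition the remainder at its first underscore) and slices the three fields straight out of the stem.
import Mathlib
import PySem

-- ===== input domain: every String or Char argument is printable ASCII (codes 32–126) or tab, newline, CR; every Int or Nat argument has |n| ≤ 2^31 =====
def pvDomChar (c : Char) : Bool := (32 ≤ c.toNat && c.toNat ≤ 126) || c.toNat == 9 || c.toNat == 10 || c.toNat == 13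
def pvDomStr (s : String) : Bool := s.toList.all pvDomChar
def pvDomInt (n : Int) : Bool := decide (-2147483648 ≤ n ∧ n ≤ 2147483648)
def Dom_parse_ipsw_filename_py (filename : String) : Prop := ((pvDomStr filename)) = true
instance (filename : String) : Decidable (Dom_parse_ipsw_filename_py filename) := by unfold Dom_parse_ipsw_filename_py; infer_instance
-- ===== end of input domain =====

-- B parses by character index (find / rpartition / partition slices) instead of A's underscore-token
-- list built by split and rejoined by join; same cost, different decomposition; equal on all inputs.

-- ===== PORT A =====

-- filename.rsplit(".", 1)[0]  — exact hand port of rsplit with maxsplit 1, first piece: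
-- everything before the LAST '.', or the whole string when there is none. (Both Pythons run this line.)
def pvStem (s : List Char) : List Char :=
  let j := PySem.Chars.rfind s ['.']
  if j = -1 then s else s.take j.toNat

-- model.replace("_", ",", 1) — exact hand port of str.replace with count 1 for one-char arguments:
-- replace the FIRST '_' (if any) by ','. (Both Pythons run this line.)
def pvReplaceFirstUS (s : List Char) : List Char :=
  let j := PySem.Chars.find s ['_']
  if j = -1 then s else s.take j.toNat ++ [','] ++ s.drop (j.toNat + 1)

-- A's for-loop with break: index of the first part containing "."
def pvFindDotIdx : List (List Char) → Option Nat
  | [] => none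
  | p :: ps => if PySem.Chars.isIn ['.'] p then some 0 else (pvFindDotIdx ps).map (· + 1)

def parse_ipsw_filename_py (filename : String) : String × String × String :=
  let stem := pvStem filename.toList
  let parts := PySem.Chars.splitOn stem ['_']
  match pvFindDotIdx parts with
  | none => ("", "", "")
  | some i =>
    if i < 1 then ("", "", "")
    else
      let model := PySem.Chars.join ['_'] (parts.take i)
      let model := pvReplaceFirstUS model
      -- parts[version_idx]: the loop guarantees the index is in range
      let version := PySem.List.pyGetD parts (i : Int) []
      let build := if i + 1 < parts.length then PySem.Chars.join ['_'] (parts.drop (i + 1)) else []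
      (String.ofList model, String.ofList version, String.ofList build)

-- ===== PORT B =====

def parse_ipsw_filename_py_alt (filename : String) : String × String × String :=
  let stem := pvStem filename.toList
  let d := PySem.Chars.find stem ['.']
  if d = -1 then ("", "", "")
  else
    -- stem[:d].rpartition("_"): (head[:j], "_", head[j+1:]) at the last '_', or ("", "", head)
    let head := stem.take d.toNat
    let j := PySem.Chars.rfind head ['_']
    if j = -1 then ("", "", "")
    else
      let model := head.take j.toNat
      -- stem[len(model) + 1:].partition("_")
      let rest := stem.drop (model.length + 1)
      let k := PySem.Chars.find rest ['_']
      let version := if k = -1 then rest else rest.take k.toNat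
      let build := if k = -1 then [] else rest.drop (k.toNat + 1)
      (String.ofList (pvReplaceFirstUS model), String.ofList version, String.ofList build)

-- ===== PRECONDITION & SPEC =====
def Spec_parse_ipsw_filename_py (filename : String) (out : String × String × String) : Prop := out = parse_ipsw_filename_py_alt filename
instance (filename : String) (out : String × String × String) : Decidable (Spec_parse_ipsw_filename_py filename out) := by unfold Spec_parse_ipsw_filename_py; infer_instance

-- ===== CLAIM (what is proved, stated in full; the proofs are below) =====
def Claim_equal_parse_ipsw_filename_py : Prop := ∀ (filename : String), Dom_parse_ipsw_filename_py filename → Spec_parse_ipsw_filename_py filename (parse_ipsw_filename_py filename)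

-- ===== LEMMAS AND PROOFS =====

theorem pvSingPrefix (c : Char) (l : List Char) : ([c] <+: l) ↔ l.head? = some c := by
  cases l with
  | nil => simp
  | cons x xs => simp [List.cons_prefix_cons, eq_comm]

theorem pvSingInfix (c : Char) (l : List Char) : ([c] <:+: l) ↔ c ∈ l := by
  constructor
  · intro h; exact h.sublist.mem (by simp)
  · intro h
    obtain ⟨s, t, rfl⟩ := List.append_of_mem h
    exact ⟨s, t, by simp⟩

theorem pvFindNone (c : Char) (l : List Char) (h : c ∉ l) : PySem.Chars.find l [c] = -1 := by
  rw [PySem.Chars.find_eq_neg_one_iff, pvSingInfix]; exact h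

theorem pvHeadDropMem (c : Char) (l : List Char) (n : Nat) (h : (l.drop n).head? = some c) : c ∈ l := by
  cases hd : l.drop n with
  | nil => simp [hd] at h
  | cons y ys =>
    rw [hd] at h
    simp at h
    subst h
    exact List.mem_of_mem_drop (by rw [hd]; simp)

theorem pvFindAppend (c : Char) (a b : List Char) (h : c ∉ a) :
    PySem.Chars.find (a ++ c :: b) [c] = (a.length : Int) := by
  have hmem : c ∈ a ++ c :: b := by simp
  have hnn : 0 ≤ PySem.Chars.find (a ++ c :: b) [c] := by
    rw [PySem.Chars.find_nonneg_iff, pvSingInfix]; exact hmem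
  obtain ⟨hpre, hmin⟩ := PySem.Chars.find_spec hnn
  set f := PySem.Chars.find (a ++ c :: b) [c] with hf
  rw [pvSingPrefix] at hpre
  have hle : a.length ≤ f.toNat := by
    by_contra hlt
    push Not at hlt
    have heq : ((a ++ c :: b).drop f.toNat).head? = (a.drop f.toNat).head? := by
      rw [List.drop_append_of_le_length (by omega)]
      cases hd : a.drop f.toNat with
      | nil => exfalso; rw [List.drop_eq_nil_iff] at hd; omega
      | cons y ys => simp
    rw [heq] at hpre
    exact h (pvHeadDropMem c a f.toNat hpre)
  have hge : f.toNat ≤ a.length := by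
    by_contra hgt
    push Not at hgt
    exact hmin a.length hgt (by rw [pvSingPrefix, List.drop_append_of_le_length (le_refl _)]; simp [List.drop_length])
  have : f.toNat = a.length := by omega
  omega

-- rfind lemmas via go
theorem pvRfindGoNone (c : Char) (l : List Char) (k : Nat)
    (h : ∀ i, i ≤ k → (l.drop i).head? ≠ some c) : PySem.Chars.rfind.go l [c] k = -1 := by
  induction k with
  | zero =>
    rw [PySem.Chars.rfind.go]
    have h0 := h 0 (le_refl _)
    rw [List.drop_zero] at h0
    simp [List.isPrefixOf_iff_prefix, pvSingPrefix, h0]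
  | succ k ih =>
    rw [PySem.Chars.rfind.go]
    have hk := h (k+1) (le_refl _)
    have : ¬ ([c].isPrefixOf (l.drop (k+1)) = true) := by
      simp only [List.isPrefixOf_iff_prefix, pvSingPrefix]; exact hk
    simp only [this]
    exact ih (fun i hi => h i (by omega))

theorem pvRfindGoAt (c : Char) (l : List Char) (k j : Nat) (hjk : j ≤ k)
    (hj : (l.drop j).head? = some c)
    (habove : ∀ i, j < i → i ≤ k → (l.drop i).head? ≠ some c) :
    PySem.Chars.rfind.go l [c] k = (j : Int) := by
  induction k with
  | zero =>
    have hj0 : j = 0 := by omega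
    subst hj0
    rw [List.drop_zero] at hj
    rw [PySem.Chars.rfind.go]
    simp [List.isPrefixOf_iff_prefix, pvSingPrefix, hj]
  | succ k ih =>
    rw [PySem.Chars.rfind.go]
    by_cases hjeq : j = k + 1
    · subst hjeq
      simp [List.isPrefixOf_iff_prefix, pvSingPrefix, hj]
    · have hnot := habove (k+1) (by omega) (le_refl _)
      have hcond : ¬ ([c].isPrefixOf (l.drop (k+1)) = true) := by
        simp only [List.isPrefixOf_iff_prefix, pvSingPrefix]; exact hnot
      simp only [hcond]
      exact ih (by omega) (fun i hi hik => habove i hi (by omega))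

theorem pvRfindNone (c : Char) (l : List Char) (h : c ∉ l) : PySem.Chars.rfind l [c] = -1 := by
  unfold PySem.Chars.rfind
  exact pvRfindGoNone c l l.length (fun i _ hc => h (pvHeadDropMem c l i hc))

theorem pvRfindAppend (c : Char) (a b : List Char) (h : c ∉ b) :
    PySem.Chars.rfind (a ++ c :: b) [c] = (a.length : Int) := by
  unfold PySem.Chars.rfind
  apply pvRfindGoAt c _ _ a.length (by simp)
  · rw [List.drop_append_of_le_length (le_refl _)]; simp [List.drop_length]
  · intro i hi _ hc
    apply h
    have : ((a ++ c :: b).drop i) = (c :: b).drop (i - a.length) := by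
      have hi' : i = a.length + (i - a.length) := by omega
      rw [hi', List.drop_append, List.drop_eq_nil_of_le (by omega : a.length ≤ a.length + (i - a.length))]
      simp
    rw [this] at hc
    have hmem := pvHeadDropMem c (c :: b) (i - a.length) hc
    cases hd : (c::b).drop (i - a.length) with
    | nil => simp [hd] at hc
    | cons y ys =>
      rw [hd] at hc; simp at hc; subst hc
      have : i - a.length = (i - a.length - 1) + 1 := by omega
      rw [this] at hd
      have : y ∈ b.drop (i - a.length - 1) := by
        rw [List.drop_succ_cons] at hd
        rw [hd]; simp
      exact List.mem_of_mem_drop this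

-- ===== splitOn characterization =====
def pvConsHead (x : List Char) : List (List Char) → List (List Char)
  | [] => [x]
  | p :: ps => (x ++ p) :: ps

def pvSplitU : List Char → List (List Char)
  | [] => [[]]
  | c :: cs => if c = '_' then [] :: pvSplitU cs else pvConsHead [c] (pvSplitU cs)

theorem pvSplitU_ne_nil (cs : List Char) : pvSplitU cs ≠ [] := by
  induction cs with
  | nil => simp [pvSplitU]
  | cons c cs ih =>
    simp only [pvSplitU]
    split
    · simp
    · cases h : pvSplitU cs with
      | nil => exact absurd h ih
      | cons p ps => simp [pvConsHead]

theorem pvConsHead_nil_id (P : List (List Char)) (h : P ≠ []) : pvConsHead [] P = P := by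
  cases P with
  | nil => exact absurd rfl h
  | cons p ps => simp [pvConsHead]

theorem pvSplitOnGo (fuel : Nat) (l cur : List Char) (acc : List (List Char))
    (h : l.length < fuel) :
    PySem.Chars.splitOn.go ['_'] fuel l cur acc = acc.reverse ++ pvConsHead cur.reverse (pvSplitU l) := by
  induction fuel generalizing l cur acc with
  | zero => omega
  | succ fuel ih =>
    cases l with
    | nil =>
      rw [PySem.Chars.splitOn.go]
      simp [pvSplitU, pvConsHead]
      omega
    | cons c rest =>
      rw [PySem.Chars.splitOn.go]
      by_cases hc : c = '_'
      · subst hc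
        have hpre : ['_'].isPrefixOf ('_' :: rest) = true := by simp
        simp only [hpre, if_true]
        have hdrop : List.drop (['_'] : List Char).length ('_' :: rest) = rest := by simp
        rw [hdrop, ih rest [] ((cur.reverse) :: acc) (by simp at h ⊢; omega)]
        cases hsp : pvSplitU rest with
        | nil => exact absurd hsp (pvSplitU_ne_nil rest)
        | cons p ps => simp [pvSplitU, pvConsHead, hsp]
      · have hpre : ¬ (['_'].isPrefixOf (c :: rest) = true) := by
          simp only [List.isPrefixOf_iff_prefix, List.cons_prefix_cons]
          exact fun e => hc e.1.symm
        simp only [hpre]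
        rw [ih rest (c :: cur) acc (by simp at h ⊢; omega)]
        simp only [pvSplitU, hc, if_false]
        cases hsp : pvSplitU rest with
        | nil => exact absurd hsp (pvSplitU_ne_nil rest)
        | cons p ps => simp [pvConsHead]

theorem pvSplitOn_eq (cs : List Char) : PySem.Chars.splitOn cs ['_'] = pvSplitU cs := by
  unfold PySem.Chars.splitOn
  rw [pvSplitOnGo (cs.length + 1) cs [] [] (by omega)]
  simp [pvConsHead_nil_id _ (pvSplitU_ne_nil cs)]

theorem pvJoinCons (s p : List Char) (P : List (List Char)) (h : P ≠ []) :
    PySem.Chars.join s (p :: P) = p ++ s ++ PySem.Chars.join s P := by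
  cases P with
  | nil => exact absurd rfl h
  | cons q qs => simp [PySem.Chars.join, List.intercalate, List.intersperse]

theorem pvJoinSingleton (s p : List Char) : PySem.Chars.join s [p] = p := by
  simp [PySem.Chars.join, List.intercalate]

theorem pvSplitU_no_us (cs : List Char) : ∀ p ∈ pvSplitU cs, '_' ∉ p := by
  induction cs with
  | nil => simp [pvSplitU]
  | cons c cs ih =>
    simp only [pvSplitU]
    by_cases hc : c = '_'
    · subst hc; simp only [if_true]
      intro p hp
      rcases List.mem_cons.mp hp with h | h
      · subst h; simp
      · exact ih p h
    · simp only [if_neg hc]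
      cases hsp : pvSplitU cs with
      | nil => exact absurd hsp (pvSplitU_ne_nil cs)
      | cons q qs =>
        simp only [pvConsHead]
        intro p hp
        rcases List.mem_cons.mp hp with h | h
        · subst h
          intro hm
          rcases List.mem_append.mp hm with h' | h'
          · simp at h'; exact hc h'.symm
          · exact ih q (by rw [hsp]; simp) h'
        · exact ih p (by rw [hsp]; simp [h])

theorem pvJoin_splitU (cs : List Char) : PySem.Chars.join ['_'] (pvSplitU cs) = cs := by
  induction cs with
  | nil => simp [pvSplitU]
  | cons c cs ih =>
    simp only [pvSplitU]
    by_cases hc : c = '_'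
    · subst hc
      rw [if_pos rfl, pvJoinCons _ _ _ (pvSplitU_ne_nil cs), ih]
      simp
    · rw [if_neg hc]
      cases hsp : pvSplitU cs with
      | nil => exact absurd hsp (pvSplitU_ne_nil cs)
      | cons q qs =>
        simp only [pvConsHead]
        cases qs with
        | nil =>
          rw [pvJoinSingleton]
          rw [hsp, pvJoinSingleton] at ih
          simp [ih]
        | cons r rs =>
          rw [pvJoinCons _ _ _ (by simp)]
          rw [hsp, pvJoinCons _ _ _ (by simp)] at ih
          simp only [List.cons_append, List.append_assoc, List.nil_append] at ih ⊢
          simp [ih]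

theorem pvMemJoin (x : Char) (P : List (List Char)) (h : x ∈ PySem.Chars.join ['_'] P) :
    x = '_' ∨ ∃ p ∈ P, x ∈ p := by
  induction P with
  | nil => simp [PySem.Chars.join, List.intercalate] at h
  | cons p ps ih =>
    cases ps with
    | nil =>
      rw [pvJoinSingleton] at h
      exact Or.inr ⟨p, by simp, h⟩
    | cons q qs =>
      rw [pvJoinCons _ _ _ (by simp)] at h
      rcases List.mem_append.mp h with h' | h'
      · rcases List.mem_append.mp h' with h'' | h''
        · exact Or.inr ⟨p, by simp, h''⟩
        · simp at h''; exact Or.inl h''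
      · rcases ih h' with h'' | ⟨r, hr, hx⟩
        · exact Or.inl h''
        · exact Or.inr ⟨r, by simp [hr], hx⟩

theorem pvJoinAppend (P Q : List (List Char)) (hP : P ≠ []) (hQ : Q ≠ []) :
    PySem.Chars.join ['_'] (P ++ Q) = PySem.Chars.join ['_'] P ++ '_' :: PySem.Chars.join ['_'] Q := by
  induction P with
  | nil => exact absurd rfl hP
  | cons p ps ih =>
    cases ps with
    | nil =>
      rw [pvJoinSingleton, List.singleton_append, pvJoinCons _ _ _ hQ]
      simp
    | cons q qs =>
      rw [List.cons_append, pvJoinCons _ _ _ (by simp), pvJoinCons _ _ _ (by simp), ih (by simp)]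
      simp


theorem pvIsInDot (p : List Char) : PySem.Chars.isIn ['.'] p = true ↔ '.' ∈ p := by
  rw [PySem.Chars.isIn_iff_infix, pvSingInfix]

theorem pvFindDotIdx_none (P : List (List Char)) (h : pvFindDotIdx P = none) :
    ∀ p ∈ P, '.' ∉ p := by
  induction P with
  | nil => simp
  | cons q qs ih =>
    simp only [pvFindDotIdx] at h
    by_cases hq : PySem.Chars.isIn ['.'] q = true
    · simp [hq] at h
    · simp [hq] at h
      intro p hp
      rcases List.mem_cons.mp hp with h' | h'
      · subst h'; rw [← pvIsInDot]; simp [hq]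
      · exact ih h p h'

theorem pvFindDotIdx_some (P : List (List Char)) (i : Nat) (h : pvFindDotIdx P = some i) :
    ∃ P₁ V R, P = P₁ ++ V :: R ∧ P₁.length = i ∧ (∀ p ∈ P₁, '.' ∉ p) ∧ '.' ∈ V := by
  induction P generalizing i with
  | nil => simp [pvFindDotIdx] at h
  | cons q qs ih =>
    simp only [pvFindDotIdx] at h
    by_cases hq : PySem.Chars.isIn ['.'] q = true
    · simp [hq] at h
      obtain rfl : i = 0 := by omega
      exact ⟨[], q, qs, by simp, by simp, by simp, (pvIsInDot q).mp hq⟩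
    · cases hi : pvFindDotIdx qs with
      | none => simp [hq, hi] at h
      | some j =>
        simp [hq, hi] at h
        obtain ⟨P₁, V, R, hP, hlen, hnd, hdV⟩ := ih j hi
        refine ⟨q :: P₁, V, R, by rw [hP]; simp, by simp [hlen]; omega, ?_, hdV⟩
        intro p hp
        rcases List.mem_cons.mp hp with h' | h'
        · subst h'; rw [← pvIsInDot]; simp [hq]
        · exact hnd p h'

theorem pvFirstSplit (c : Char) (l : List Char) (h : c ∈ l) :
    ∃ a b, l = a ++ c :: b ∧ c ∉ a := by
  induction l with
  | nil => simp at h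
  | cons x xs ih =>
    by_cases hx : x = c
    · subst hx; exact ⟨[], xs, rfl, by simp⟩
    · rcases List.mem_cons.mp h with h' | h'
      · exact absurd h'.symm hx
      · obtain ⟨a, b, rfl, hna⟩ := ih h'
        exact ⟨x :: a, b, rfl, by simp [hna]; exact fun e => hx e.symm⟩


theorem pvDropAppendCons {α : Type} (l₁ l₂ : List α) (c : α) :
    (l₁ ++ c :: l₂).drop (l₁.length + 1) = l₂ := by
  rw [List.drop_append, List.drop_eq_nil_of_le (by omega)]; simp

theorem pvGetDAppend (P₁ : List (List Char)) (V : List Char) (R : List (List Char)) :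
    PySem.List.pyGetD (P₁ ++ V :: R) ((P₁.length : Int)) [] = V := by
  rw [PySem.List.pyGetD_natCast, List.getD_eq_getElem?_getD,
      List.getElem?_append_right (le_refl _)]
  simp

theorem pvMaster (cs : List Char) :
    (match pvFindDotIdx (PySem.Chars.splitOn cs ['_']) with
      | none => (("" : String), ("" : String), ("" : String))
      | some i =>
        if i < 1 then ("", "", "")
        else
          (String.ofList (pvReplaceFirstUS (PySem.Chars.join ['_'] ((PySem.Chars.splitOn cs ['_']).take i))),
           String.ofList (PySem.List.pyGetD (PySem.Chars.splitOn cs ['_']) (i : Int) []),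
           String.ofList (if i + 1 < (PySem.Chars.splitOn cs ['_']).length then
             PySem.Chars.join ['_'] ((PySem.Chars.splitOn cs ['_']).drop (i + 1)) else [])))
    =
    (if PySem.Chars.find cs ['.'] = -1 then (("" : String), ("" : String), ("" : String))
     else
       if PySem.Chars.rfind (cs.take (PySem.Chars.find cs ['.']).toNat) ['_'] = -1 then ("", "", "")
       else
         (String.ofList (pvReplaceFirstUS ((cs.take (PySem.Chars.find cs ['.']).toNat).take
            (PySem.Chars.rfind (cs.take (PySem.Chars.find cs ['.']).toNat) ['_']).toNat)),
          String.ofList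
            (if PySem.Chars.find (cs.drop (((cs.take (PySem.Chars.find cs ['.']).toNat).take
                  (PySem.Chars.rfind (cs.take (PySem.Chars.find cs ['.']).toNat) ['_']).toNat).length + 1)) ['_'] = -1
             then cs.drop (((cs.take (PySem.Chars.find cs ['.']).toNat).take
                  (PySem.Chars.rfind (cs.take (PySem.Chars.find cs ['.']).toNat) ['_']).toNat).length + 1)
             else (cs.drop (((cs.take (PySem.Chars.find cs ['.']).toNat).take
                  (PySem.Chars.rfind (cs.take (PySem.Chars.find cs ['.']).toNat) ['_']).toNat).length + 1)).take
                  (PySem.Chars.find (cs.drop (((cs.take (PySem.Chars.find cs ['.']).toNat).take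
                    (PySem.Chars.rfind (cs.take (PySem.Chars.find cs ['.']).toNat) ['_']).toNat).length + 1)) ['_']).toNat),
          String.ofList
            (if PySem.Chars.find (cs.drop (((cs.take (PySem.Chars.find cs ['.']).toNat).take
                  (PySem.Chars.rfind (cs.take (PySem.Chars.find cs ['.']).toNat) ['_']).toNat).length + 1)) ['_'] = -1
             then []
             else (cs.drop (((cs.take (PySem.Chars.find cs ['.']).toNat).take
                  (PySem.Chars.rfind (cs.take (PySem.Chars.find cs ['.']).toNat) ['_']).toNat).length + 1)).drop
                  ((PySem.Chars.find (cs.drop (((cs.take (PySem.Chars.find cs ['.']).toNat).take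
                    (PySem.Chars.rfind (cs.take (PySem.Chars.find cs ['.']).toNat) ['_']).toNat).length + 1)) ['_']).toNat + 1)))) := by
  rw [pvSplitOn_eq cs]
  have hjoin := pvJoin_splitU cs
  cases hfd : pvFindDotIdx (pvSplitU cs) with
  | none =>
    have hnd := pvFindDotIdx_none _ hfd
    have hdot : '.' ∉ cs := by
      intro hin
      rw [← hjoin] at hin
      rcases pvMemJoin _ _ hin with h | ⟨p, hp, hx⟩
      · exact absurd h (by decide)
      · exact hnd p hp hx
    rw [pvFindNone _ _ hdot, if_pos rfl]
  | some i =>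
    simp only []
    obtain ⟨P₁, V, R, hP, hlen, hnd, hdV⟩ := pvFindDotIdx_some _ _ hfd
    obtain ⟨V₁, V₂, hV, hndV₁⟩ := pvFirstSplit '.' V hdV
    have hVmem : V ∈ pvSplitU cs := by rw [hP]; simp
    have hVus : '_' ∉ V := pvSplitU_no_us cs V hVmem
    have hV₁us : '_' ∉ V₁ := fun h => hVus (by rw [hV]; simp [h])
    cases P₁ with
    | nil =>
      simp only [List.length_nil] at hlen
      subst hlen
      simp only [List.nil_append] at hP
      rw [hP] at hjoin
      obtain ⟨t, hcs⟩ : ∃ t, cs = V₁ ++ '.' :: (V₂ ++ t) := by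
        cases R with
        | nil =>
          rw [pvJoinSingleton] at hjoin
          exact ⟨[], by rw [← hjoin, hV]; simp⟩
        | cons r rs =>
          rw [pvJoinCons _ _ _ (by simp)] at hjoin
          exact ⟨'_' :: PySem.Chars.join ['_'] (r :: rs), by rw [← hjoin, hV]; simp⟩
      have hfind0 : PySem.Chars.find cs ['.'] = (V₁.length : Int) := by
        rw [hcs]; exact pvFindAppend _ _ _ hndV₁
      rw [if_pos Nat.zero_lt_one]
      rw [hfind0, if_neg (show ¬((V₁.length : Int) = -1) by omega), Int.toNat_natCast]
      have hhead0 : cs.take V₁.length = V₁ := by rw [hcs]; exact List.take_left' rfl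
      rw [hhead0, pvRfindNone _ _ hV₁us, if_pos rfl]
    | cons q P₁' =>
      have hne : (q :: P₁') ≠ ([] : List (List Char)) := by simp
      have hLdot : '.' ∉ PySem.Chars.join ['_'] (q :: P₁') := by
        intro hin
        rcases pvMemJoin _ _ hin with h | ⟨p, hp, hx⟩
        · exact absurd h (by decide)
        · exact hnd p hp hx
      obtain ⟨t, hcs, hrest⟩ :
          ∃ t, cs = PySem.Chars.join ['_'] (q :: P₁') ++ '_' :: (V ++ t) ∧
            ((R = [] ∧ t = []) ∨ (R ≠ [] ∧ t = '_' :: PySem.Chars.join ['_'] R)) := by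
        cases R with
        | nil =>
          have h1 : PySem.Chars.join ['_'] ((q :: P₁') ++ [V]) =
              PySem.Chars.join ['_'] (q :: P₁') ++ '_' :: V := by
            rw [pvJoinAppend (q :: P₁') [V] hne (by simp), pvJoinSingleton]
          refine ⟨[], ?_, Or.inl ⟨rfl, rfl⟩⟩
          rw [← hjoin, hP, h1]; simp
        | cons r rs =>
          have h2 : PySem.Chars.join ['_'] (V :: r :: rs) =
              V ++ '_' :: PySem.Chars.join ['_'] (r :: rs) := by
            rw [pvJoinCons _ _ _ (by simp)]; simp
          have h1 : PySem.Chars.join ['_'] ((q :: P₁') ++ V :: r :: rs) =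
              PySem.Chars.join ['_'] (q :: P₁') ++ '_' :: (V ++ '_' :: PySem.Chars.join ['_'] (r :: rs)) := by
            rw [pvJoinAppend (q :: P₁') (V :: r :: rs) hne (by simp), h2]
          refine ⟨'_' :: PySem.Chars.join ['_'] (r :: rs), ?_, Or.inr ⟨by simp, rfl⟩⟩
          rw [← hjoin, hP, h1]
      have hA₀ : cs = (PySem.Chars.join ['_'] (q :: P₁') ++ '_' :: V₁) ++ '.' :: (V₂ ++ t) := by
        rw [hcs, hV]; simp
      have hA₀nd : '.' ∉ PySem.Chars.join ['_'] (q :: P₁') ++ '_' :: V₁ := by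
        intro hin
        rcases List.mem_append.mp hin with h | h
        · exact hLdot h
        · rcases List.mem_cons.mp h with h' | h'
          · exact absurd h' (by decide)
          · exact hndV₁ h'
      -- value of find cs ['.']
      have hfind : PySem.Chars.find cs ['.'] =
          ((PySem.Chars.join ['_'] (q :: P₁') ++ '_' :: V₁).length : Int) := by
        conv_lhs => rw [hA₀]
        exact pvFindAppend _ _ _ hA₀nd
      have hige : ¬ i < 1 := by rw [← hlen]; simp
      rw [if_neg hige, hfind,
          if_neg (show ¬(((PySem.Chars.join ['_'] (q :: P₁') ++ '_' :: V₁).length : Int) = -1) by omega),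
          Int.toNat_natCast]
      have hhead : cs.take (PySem.Chars.join ['_'] (q :: P₁') ++ '_' :: V₁).length =
          PySem.Chars.join ['_'] (q :: P₁') ++ '_' :: V₁ := by
        conv_lhs => rw [hA₀]
        exact List.take_left' rfl
      rw [hhead, pvRfindAppend _ _ _ hV₁us,
          if_neg (show ¬(((PySem.Chars.join ['_'] (q :: P₁')).length : Int) = -1) by omega),
          Int.toNat_natCast, List.take_left' rfl]
      have hdropcs : cs.drop ((PySem.Chars.join ['_'] (q :: P₁')).length + 1) = V ++ t := by
        rw [hcs]; exact pvDropAppendCons _ _ _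
      rw [hdropcs]
      have htake : (pvSplitU cs).take i = q :: P₁' := by rw [hP, List.take_left' hlen]
      rw [htake]
      have hver : PySem.List.pyGetD (pvSplitU cs) (i : Int) [] = V := by
        rw [hP, ← hlen, pvGetDAppend]
      rw [hver]
      rcases hrest with ⟨hR, ht⟩ | ⟨hR, ht⟩
      · subst hR; subst ht
        rw [List.append_nil, pvFindNone _ _ hVus, if_pos rfl, if_pos rfl]
        have hlenP : (pvSplitU cs).length = i + 1 := by
          rw [hP, ← hlen]; simp
        rw [hlenP, if_neg (show ¬(i + 1 < i + 1) by omega)]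
      · subst ht
        cases R with
        | nil => exact absurd rfl hR
        | cons r rs =>
          rw [pvFindAppend _ _ _ hVus,
              if_neg (show ¬(((V.length : Int)) = -1) by omega),
              Int.toNat_natCast, List.take_left' rfl, pvDropAppendCons,
              if_neg (show ¬(((V.length : Int)) = -1) by omega)]
          have hlenP : (pvSplitU cs).length = i + 1 + (r :: rs).length := by
            rw [hP, ← hlen]; simp; omega
          rw [hlenP, if_pos (show i + 1 < i + 1 + (r :: rs).length by simp)]
          have hdropP : (pvSplitU cs).drop (i + 1) = r :: rs := by
            rw [hP, ← hlen]; exact pvDropAppendCons _ _ _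
          rw [hdropP]

-- ===== VERDICT (by name: the statement is the Claim_ definition above) =====

theorem parse_ipsw_filename_py_spec : Claim_equal_parse_ipsw_filename_py := by
  intro f _
  unfold Spec_parse_ipsw_filename_py
  exact pvMaster (pvStem f.toList)
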